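-- pv_equiv track=rewrite | github.com/Hrishikesh332/Signal | backend/market_monitor_api/services/market_signals.py | build_canonical_id
-- ===== SOURCE A (Python) =====
-- def build_canonical_id(prefix: str, value: str | None) -> str | None:
--     if not isinstance(value, str) or not value.strip():
--         return None
--     normalized = "".join(character.lower() if character.isalnum() else "-" for character in value.strip())
--     normalized = "-".join(part for part in normalized.split("-") if part)
--     if not normalized:
--         return None
--     return f"{prefix}-{normalized}"
-- ===== SOURCE B (Python) =====
-- def build_canonical_id(prefix: str, value: str | None) -> str | None:
--     if not isinstance(value, str):
--         return None
--     tokens = []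
--     buffer = ""
--     for character in value:
--         if character.isalnum():
--             buffer += character.lower()
--         else:
--             if buffer:
--                 tokens.append(buffer)
--             buffer = ""
--     if buffer:
--         tokens.append(buffer)
--     if not tokens:
--         return None
--     return f"{prefix}-" + "-".join(tokens)
-- ===== Notes on version B (the rewrite author's own statement) =====
-- stated objective: simpler
-- what changed: Replaced A's pipeline (map every char to lower-or-dash, split the result on '-', filter empty parts, re-join) by a single direct scan that collects the maximal alphanumeric runs, lowercased, as tokens; the strip() pre-pass disappears because whitespace is not alphanumeric.
import Mathlib
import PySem

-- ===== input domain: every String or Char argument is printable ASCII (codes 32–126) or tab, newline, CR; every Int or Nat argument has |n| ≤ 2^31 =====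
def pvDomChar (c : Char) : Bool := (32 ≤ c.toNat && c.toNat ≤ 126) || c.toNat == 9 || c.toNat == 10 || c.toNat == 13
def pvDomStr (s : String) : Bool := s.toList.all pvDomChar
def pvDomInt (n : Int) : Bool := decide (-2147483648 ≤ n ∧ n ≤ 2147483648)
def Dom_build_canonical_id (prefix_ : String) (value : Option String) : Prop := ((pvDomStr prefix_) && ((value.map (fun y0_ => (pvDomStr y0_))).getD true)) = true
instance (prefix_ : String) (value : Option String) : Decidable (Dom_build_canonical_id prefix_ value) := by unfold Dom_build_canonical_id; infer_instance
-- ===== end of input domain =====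

-- B replaces A's map-to-dashes / split-on-dash / filter / re-join pipeline by a single direct
-- scan that collects the maximal alphanumeric runs (lowercased) as tokens; objective: simpler.

-- ===== PORT A =====
def build_canonical_id (prefix_ : String) (value : Option String) : Option String :=
  match value with
  | none => none                     -- not isinstance(value, str)
  | some v =>
    if PySem.Str.strip v = "" then none       -- not value.strip()
    else
      -- "".join(character.lower() if character.isalnum() else "-" for character in value.strip())
      -- (character.lower() on a one-character string is PySem.Chars.lowerChar)
      let normalized : String := String.ofList ((PySem.Str.strip v).toList.map
        (fun character => if PySem.Chars.isalnum character then PySem.Chars.lowerChar character else '-'))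
      -- "-".join(part for part in normalized.split("-") if part)  ("-" is non-empty, so split? is some)
      let normalized2 : String := PySem.Str.join "-"
        (((PySem.Str.split? normalized "-").getD []).filter (fun part => part ≠ ""))
      if normalized2 = "" then none
      else some (prefix_ ++ "-" ++ normalized2)

-- ===== PORT B =====
-- the for-loop of Source B: state = (tokens, buffer), one step per character, final flush at the end
def altScan (tokens : List (List Char)) (buffer : List Char) : List Char → List (List Char)
  | [] => if buffer = [] then tokens else tokens ++ [buffer]
  | character :: rest =>
    if PySem.Chars.isalnum character then
      altScan tokens (buffer ++ [PySem.Chars.lowerChar character]) rest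
    else if buffer = [] then altScan tokens [] rest
    else altScan (tokens ++ [buffer]) [] rest

def build_canonical_id_alt (prefix_ : String) (value : Option String) : Option String :=
  match value with
  | none => none
  | some v =>
    let tokens := altScan [] [] v.toList
    if tokens = [] then none
    else some (prefix_ ++ "-" ++ String.ofList (PySem.Chars.join ['-'] tokens))

-- ===== PRECONDITION & SPEC =====
def Spec_build_canonical_id (prefix_ : String) (value : Option String) (out : Option String) : Prop := out = build_canonical_id_alt prefix_ value
instance (prefix_ : String) (value : Option String) (out : Option String) : Decidable (Spec_build_canonical_id prefix_ value out) := by unfold Spec_build_canonical_id; infer_instance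

-- ===== CLAIM (what is proved, stated in full; the proofs are below) =====
def Claim_equal_build_canonical_id : Prop := ∀ (prefix_ : String) (value : Option String), Dom_build_canonical_id prefix_ value → Spec_build_canonical_id prefix_ value (build_canonical_id prefix_ value)

-- ===== LEMMAS AND PROOFS =====

-- character-class facts
theorem pv_lits : ('A'.val.toNat = 65) ∧ ('Z'.val.toNat = 90) ∧ ('a'.val.toNat = 97) ∧ ('z'.val.toNat = 122) ∧ ('0'.val.toNat = 48) ∧ ('9'.val.toNat = 57) ∧ ('-'.val.toNat = 45) := by decide

theorem isspace_not_alnum (c : Char) (h : PySem.Chars.isspace c = true) :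
    PySem.Chars.isalnum c = false := by
  obtain ⟨h1,h2,h3,h4,h5,h6,h7⟩ := pv_lits
  simp only [PySem.Chars.isspace, Char.toNat, Bool.or_eq_true, Bool.and_eq_true, decide_eq_true_eq] at h
  simp only [PySem.Chars.isalnum, PySem.Chars.isalpha, PySem.Chars.isdigit,
        PySem.Chars.isupper, PySem.Chars.islower, Char.le_def, UInt32.le_iff_toNat_le,
        Bool.or_eq_false_iff, Bool.and_eq_false_iff, decide_eq_false_iff_not, not_le,
        h1,h2,h3,h4,h5,h6]
  omega

theorem alnum_lower_ne_dash (c : Char) (h : PySem.Chars.isalnum c = true) :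
    PySem.Chars.lowerChar c ≠ '-' := by
  obtain ⟨h1,h2,h3,h4,h5,h6,h7⟩ := pv_lits
  simp only [PySem.Chars.isalnum, PySem.Chars.isalpha, PySem.Chars.isdigit,
        PySem.Chars.isupper, PySem.Chars.islower, Char.le_def, UInt32.le_iff_toNat_le,
        Bool.or_eq_true, Bool.and_eq_true, decide_eq_true_eq, h1,h2,h3,h4,h5,h6] at h
  intro heq
  have hv := congrArg (fun d => d.val.toNat) heq
  simp only [h7] at hv
  simp only [PySem.Chars.lowerChar] at hv
  split at hv
  · rename_i hu
    simp only [PySem.Chars.isupper, Char.le_def, UInt32.le_iff_toNat_le,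
        Bool.and_eq_true, decide_eq_true_eq, h1, h2] at hu
    have hofn : (Char.ofNat (c.toNat + 32)).val.toNat = c.toNat + 32 := by
      have hval : Nat.isValidChar (c.toNat + 32) := by
        unfold Nat.isValidChar; left; simp only [Char.toNat]; omega
      simp [Char.ofNat, hval, Char.ofNatAux]
      simp only [Char.toNat]
      omega
    rw [hofn] at hv
    simp only [Char.toNat] at hv
    omega
  · rename_i hu
    simp only [PySem.Chars.isupper, Char.le_def, UInt32.le_iff_toNat_le,
        Bool.and_eq_true, decide_eq_true_eq, h1, h2, not_and, not_le] at hu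
    omega

-- the map-then-split side, characterised: splitD cs = cs.split("-") (single-char separator)
def splitD : List Char → List (List Char)
  | [] => [[]]
  | c :: cs => if c = '-' then [] :: splitD cs else
      match splitD cs with
      | [] => [[c]]
      | p :: ps => (c :: p) :: ps

def consHeadL (b : List Char) : List (List Char) → List (List Char)
  | [] => [b]
  | p :: ps => (b ++ p) :: ps

theorem splitD_ne_nil (cs : List Char) : splitD cs ≠ [] := by
  cases cs with
  | nil => simp [splitD]
  | cons c cs => simp only [splitD]; split <;> [simp; split <;> simp]

theorem go_eq' (fuel : Nat) (l cur : List Char) (acc : List (List Char)) (h : l.length ≤ fuel) :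
    PySem.Chars.splitOn.go ['-'] fuel l cur acc = acc.reverse ++ consHeadL cur.reverse (splitD l) := by
  induction fuel generalizing l cur acc with
  | zero =>
    have : l = [] := by cases l <;> simp_all
    subst this
    rw [PySem.Chars.splitOn.go]
    simp [splitD, consHeadL]
  | succ fuel ih =>
    cases l with
    | nil =>
      rw [PySem.Chars.splitOn.go]
      simp only [splitD, consHeadL, List.reverse_cons]
      simp
      omega
    | cons c rest =>
      rw [PySem.Chars.splitOn.go]
      by_cases hc : c = '-'
      · subst hc
        simp only [List.isPrefixOf, BEq.rfl, Bool.true_and, if_pos]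
        have hdrop : List.drop ['-'].length ('-' :: rest) = rest := rfl
        rw [hdrop, ih rest [] (cur.reverse :: acc) (by simpa using Nat.le_of_succ_le_succ (by simpa using h))]
        simp only [splitD]
        cases hsd : splitD rest with
        | nil => exact absurd hsd (splitD_ne_nil rest)
        | cons p ps => simp [consHeadL]
      · have : (['-'].isPrefixOf (c :: rest)) = false := by
          simp [List.isPrefixOf]; intro hh; exact hc hh.symm
        rw [this]
        simp only [Bool.false_eq_true, if_false]
        rw [ih rest (c :: cur) acc (by simpa using Nat.le_of_succ_le_succ (by simpa using h))]
        simp only [splitD, if_neg hc]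
        cases hsd : splitD rest with
        | nil => exact absurd hsd (splitD_ne_nil rest)
        | cons p ps => simp [consHeadL]

theorem splitOn_dash (cs : List Char) : PySem.Chars.splitOn cs ['-'] = splitD cs := by
  rw [PySem.Chars.splitOn, go_eq' (cs.length + 1) cs [] [] (by omega)]
  cases hsd : splitD cs with
  | nil => exact absurd hsd (splitD_ne_nil cs)
  | cons p ps => simp [consHeadL]

def fchar (c : Char) : Char := if PySem.Chars.isalnum c then PySem.Chars.lowerChar c else '-'

theorem consHeadL_nil (ps : List (List Char)) (h : ps ≠ []) : consHeadL [] ps = ps := by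
  cases ps with
  | nil => exact absurd rfl h
  | cons p ps' => simp [consHeadL]

-- the heart of the equivalence: B's scan equals A's split/filter pipeline
theorem altScan_eq (cs : List Char) : ∀ (tokens : List (List Char)) (buffer : List Char),
    altScan tokens buffer cs
      = tokens ++ (consHeadL buffer (splitD (cs.map fchar))).filter (fun p => p ≠ []) := by
  induction cs with
  | nil =>
    intro tokens buffer
    simp only [altScan, List.map_nil, splitD, consHeadL, List.append_nil]
    by_cases hb : buffer = []
    · simp [hb]
    · simp [hb]
  | cons c cs ih =>
    intro tokens buffer
    simp only [altScan, List.map_cons]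
    by_cases ha : PySem.Chars.isalnum c = true
    · rw [if_pos ha, ih]
      have hf : fchar c = PySem.Chars.lowerChar c := by simp [fchar, ha]
      have hnd : fchar c ≠ '-' := by rw [hf]; exact alnum_lower_ne_dash c ha
      simp only [splitD, if_neg hnd]
      cases hsd : splitD (cs.map fchar) with
      | nil => exact absurd hsd (splitD_ne_nil _)
      | cons p ps => simp [consHeadL, hf]
    · rw [if_neg ha]
      have hf : fchar c = '-' := by simp [fchar, ha]
      cases hsd : splitD (cs.map fchar) with
      | nil => exact absurd hsd (splitD_ne_nil _)
      | cons p ps =>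
        by_cases hb : buffer = []
        · rw [if_pos hb, ih, hb]
          simp [splitD, hf, hsd, consHeadL]
        · rw [if_neg hb, ih]
          simp [splitD, hf, hsd, consHeadL, hb]

-- dropping non-alphanumeric characters at either end does not change the tokens
theorem altScan_nonalnum (ws : List Char) (hw : ∀ w ∈ ws, PySem.Chars.isalnum w = false) :
    ∀ (tokens : List (List Char)) (buffer : List Char),
    altScan tokens buffer ws = altScan tokens buffer [] := by
  induction ws with
  | nil => intro _ _; rfl
  | cons w ws ih =>
    intro tokens buffer
    have hwa : PySem.Chars.isalnum w = false := hw w (by simp)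
    have hws : ∀ u ∈ ws, PySem.Chars.isalnum u = false := fun u hu => hw u (by simp [hu])
    simp only [altScan, hwa, Bool.false_eq_true, if_false]
    by_cases hb : buffer = []
    · rw [if_pos hb, ih hws, hb]; rfl
    · rw [if_neg hb, ih hws]; simp [altScan, hb]

theorem altScan_append_nonalnum (cs ws : List Char)
    (hw : ∀ w ∈ ws, PySem.Chars.isalnum w = false) :
    ∀ (tokens : List (List Char)) (buffer : List Char),
    altScan tokens buffer (cs ++ ws) = altScan tokens buffer cs := by
  induction cs with
  | nil => intro tokens buffer; simpa using altScan_nonalnum ws hw tokens buffer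
  | cons c cs ih =>
    intro tokens buffer
    simp only [List.cons_append, altScan]
    split
    · exact ih _ _
    · split <;> exact ih _ _

theorem altScan_lstrip (cs : List Char) :
    altScan [] [] (PySem.Chars.lstrip cs) = altScan [] [] cs := by
  rw [PySem.Chars.lstrip]
  induction cs with
  | nil => rfl
  | cons c cs ih =>
    by_cases hs : PySem.Chars.isspace c = true
    · rw [List.dropWhile_cons_of_pos (by simpa using hs), ih]
      simp [altScan, isspace_not_alnum c hs]
    · rw [List.dropWhile_cons_of_neg (by simpa using hs)]

theorem altScan_strip (cs : List Char) :
    altScan [] [] (PySem.Chars.strip cs) = altScan [] [] cs := by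
  rw [PySem.Chars.strip, PySem.Chars.rstrip]
  have hsplit : PySem.Chars.lstrip cs
      = (List.dropWhile PySem.Chars.isspace (PySem.Chars.lstrip cs).reverse).reverse
        ++ (List.takeWhile PySem.Chars.isspace (PySem.Chars.lstrip cs).reverse).reverse := by
    rw [← List.reverse_append, List.takeWhile_append_dropWhile, List.reverse_reverse]
  have hw : ∀ w ∈ (List.takeWhile PySem.Chars.isspace (PySem.Chars.lstrip cs).reverse).reverse,
      PySem.Chars.isalnum w = false := by
    intro w hwmem
    rw [List.mem_reverse] at hwmem
    exact isspace_not_alnum w (List.mem_takeWhile_imp hwmem)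
  calc altScan [] [] (List.dropWhile PySem.Chars.isspace (PySem.Chars.lstrip cs).reverse).reverse
      = altScan [] [] (PySem.Chars.lstrip cs) := by
        conv_rhs => rw [hsplit]
        exact (altScan_append_nonalnum _ _ hw [] []).symm
    _ = altScan [] [] cs := altScan_lstrip cs

-- joining non-empty parts with "-" is empty iff there are no parts
theorem join_dash_eq_nil (ps : List (List Char)) (hps : ∀ p ∈ ps, p ≠ []) :
    PySem.Chars.join ['-'] ps = [] ↔ ps = [] := by
  cases ps with
  | nil => simp [PySem.Chars.join, List.intercalate]
  | cons p ps' =>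
    cases ps' with
    | nil =>
      have hj : PySem.Chars.join ['-'] [p] = p := by simp [PySem.Chars.join, List.intercalate]
      rw [hj]
      simp [hps p (by simp)]
    | cons q ps'' =>
      constructor
      · intro h
        have : PySem.Chars.join ['-'] (p :: q :: ps'') = p ++ '-' :: PySem.Chars.join ['-'] (q :: ps'') := by
          simp [PySem.Chars.join, List.intercalate, List.intersperse]
        rw [this] at h
        simp at h
      · intro h; simp at h

-- moving String.filter(· ≠ "") to the char-list side
theorem filter_toList (ps : List String) :
    (ps.filter (fun p => p ≠ "")).map String.toList
      = (ps.map String.toList).filter (fun p => p ≠ []) := by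
  induction ps with
  | nil => rfl
  | cons p ps ih =>
    by_cases hp : p = ""
    · subst hp; simpa using ih
    · have hp' : p.toList ≠ [] := by
        intro hnil
        exact hp (String.toList_inj.mp (by simpa using hnil))
      simp [hp, hp']
      simpa using ih

-- the whole pipeline of A, on the char list, equals B's scan
theorem pipeline_eq (cs : List Char) :
    ((splitD (cs.map fchar)).filter (fun p => p ≠ [])) = altScan [] [] cs := by
  rw [altScan_eq cs [] []]
  rw [consHeadL_nil _ (splitD_ne_nil _)]
  simp

theorem altScan_tokens_ne_nil (cs : List Char) : ∀ p ∈ altScan [] [] cs, p ≠ [] := by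
  intro p hp
  rw [← pipeline_eq] at hp
  have := List.of_mem_filter hp
  simpa using this

-- ===== VERDICT (by name: the statement is the Claim_ definition above) =====
theorem build_canonical_id_spec : Claim_equal_build_canonical_id := by
  intro prefix_ value _hdom
  unfold Spec_build_canonical_id build_canonical_id build_canonical_id_alt
  cases value with
  | none => rfl
  | some v =>
    simp only
    by_cases hstrip : PySem.Str.strip v = ""
    · rw [if_pos hstrip]
      have htok : altScan [] [] v.toList = [] := by
        rw [← altScan_strip, ← PySem.Str.toList_strip, hstrip]
        rfl
      rw [if_pos htok]
    · rw [if_neg hstrip]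
      -- char-level identification of A's normalized2
      have hnormL : (String.ofList ((PySem.Str.strip v).toList.map
          (fun character => if PySem.Chars.isalnum character then PySem.Chars.lowerChar character else '-'))).toList
          = (PySem.Str.strip v).toList.map fchar := by
        rw [String.toList_ofList]; rfl
      set normalized := String.ofList ((PySem.Str.strip v).toList.map
          (fun character => if PySem.Chars.isalnum character then PySem.Chars.lowerChar character else '-')) with hnorm
      have hsplit : ((PySem.Str.split? normalized "-").getD []).map String.toList
          = PySem.Chars.splitOn normalized.toList ['-'] := by
        have h1 := PySem.Str.split?_map normalized "-"
        rw [PySem.Chars.split?] at h1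
        simp only [List.isEmpty_iff] at h1
        rw [if_neg (by intro hh; cases hh)] at h1
        cases hsp : PySem.Str.split? normalized "-" with
        | none => rw [hsp] at h1; simp at h1
        | some ps => rw [hsp] at h1; simpa using h1
      have hjoin : (PySem.Str.join "-"
            (((PySem.Str.split? normalized "-").getD []).filter (fun part => part ≠ ""))).toList
          = PySem.Chars.join ['-'] (altScan [] [] v.toList) := by
        rw [PySem.Str.toList_join]
        have : ("-" : String).toList = ['-'] := rfl
        rw [this, filter_toList, hsplit, hnormL, splitOn_dash, pipeline_eq]
        rw [PySem.Str.toList_strip, altScan_strip]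
      set normalized2 := PySem.Str.join "-"
          (((PySem.Str.split? normalized "-").getD []).filter (fun part => part ≠ "")) with hnorm2
      by_cases htok : altScan [] [] v.toList = []
      · rw [if_pos htok]
        have : normalized2 = "" := by
          rw [← String.toList_inj, hjoin, htok]
          rfl
        rw [if_pos this]
      · rw [if_neg htok]
        have hne : normalized2 ≠ "" := by
          intro hh
          apply htok
          rw [← join_dash_eq_nil _ (altScan_tokens_ne_nil v.toList), ← hjoin, hh]
          rfl
        rw [if_neg hne]
        have : normalized2 = String.ofList (PySem.Chars.join ['-'] (altScan [] [] v.toList)) := by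
          rw [← String.toList_inj, hjoin, String.toList_ofList]
        rw [this]
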